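-- pv_equiv track=rewrite | github.com/angelsgrove99-beep/ParadoxModPatcher | src/core/structural_merger.py | _normalize_block_content
-- ===== SOURCE A (Python) =====
-- def _normalize_block_content(content: str) -> str:
--     """
--     Нормализует содержимое блока для сравнения.
--     Убирает пробелы, переносы строк, комментарии.
--     """
--     # Убираем комментарии
--     lines = []
--     for line in content.split('\n'):
--         if '#' in line:
--             line = line[:line.index('#')]
--         line = line.strip()
--         if line:
--             lines.append(line)
--
--     # Соединяем и нормализуем пробелы
--     normalized = ' '.join(lines)
--     # Убираем множественные пробелы
--     normalized = ' '.join(normalized.split())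
--     return normalized
-- ===== SOURCE B (Python) =====
-- def _normalize_block_content(content: str) -> str:
--     """One character-level pass drops comment text ('#' to end of line);
--     then whitespace-split/join collapses all remaining whitespace."""
--     kept = []
--     in_comment = False
--     for ch in content:
--         if ch == '\n':
--             in_comment = False
--             kept.append(ch)
--         elif ch == '#':
--             in_comment = True
--         elif not in_comment:
--             kept.append(ch)
--     return ' '.join(''.join(kept).split())
-- ===== Notes on version B (the rewrite author's own statement) =====
-- stated objective: alternative
-- what changed: B replaces A's per-line pipeline (split on newlines, '#'-membership test with index/slice, strip, filter, accumulate, double join) by a single character-level pass with an in_comment flag that drops comment text, followed by one whitespace split/join.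
import Mathlib
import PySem

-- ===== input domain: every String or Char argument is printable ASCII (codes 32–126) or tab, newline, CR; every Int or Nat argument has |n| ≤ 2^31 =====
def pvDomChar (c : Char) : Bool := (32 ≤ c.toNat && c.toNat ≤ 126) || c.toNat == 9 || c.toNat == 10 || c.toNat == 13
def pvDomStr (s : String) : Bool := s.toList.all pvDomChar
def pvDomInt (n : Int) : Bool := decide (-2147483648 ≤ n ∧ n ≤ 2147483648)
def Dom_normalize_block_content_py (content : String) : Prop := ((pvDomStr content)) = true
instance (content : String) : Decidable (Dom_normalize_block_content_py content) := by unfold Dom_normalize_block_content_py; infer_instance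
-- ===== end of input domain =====

-- B replaces A's per-line split/index/slice/strip/filter pipeline by one character pass with an
-- in_comment flag followed by a whitespace split/join (alternative decomposition, same cost).

-- ===== PORT A =====
-- line.index('#') is guarded by '#' in line, so it equals find and never raises; ported as find.
def normalize_block_content_py (content : String) : String :=
  let lines : List String :=
    ((PySem.Str.split? content "\n").getD []).foldl
      (fun acc line =>
        let line1 := if PySem.Str.isIn "#" line = true
                     then PySem.Str.slice line none (some (PySem.Str.find line "#"))
                     else line
        let line2 := PySem.Str.strip line1
        if line2 ≠ "" then acc ++ [line2] else acc) []
  let normalized := PySem.Str.join " " lines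
  PySem.Str.join " " (PySem.Str.split₀ normalized)

-- ===== PORT B =====
-- Source B's for-loop over the characters, as the obvious structural recursion over the in_comment state
def pvScrub : List Char → Bool → List Char
  | [], _ => []
  | c :: rest, inc =>
    if c = '\n' then c :: pvScrub rest false
    else if c = '#' then pvScrub rest true
    else if inc then pvScrub rest true
    else c :: pvScrub rest inc

def normalize_block_content_py_alt (content : String) : String :=
  PySem.Str.join " " (PySem.Str.split₀ (String.ofList (pvScrub content.toList false)))

-- ===== PRECONDITION & SPEC =====
def Spec_normalize_block_content_py (content : String) (out : String) : Prop := out = normalize_block_content_py_alt content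
instance (content : String) (out : String) : Decidable (Spec_normalize_block_content_py content out) := by unfold Spec_normalize_block_content_py; infer_instance

-- ===== CLAIM (what is proved, stated in full; the proofs are below) =====
def Claim_equal_normalize_block_content_py : Prop := ∀ (content : String), Dom_normalize_block_content_py content → Spec_normalize_block_content_py content (normalize_block_content_py content)

-- ===== LEMMAS AND PROOFS =====

-- split of the content on '\n', as a plain structural recursion (proof-side spec)
def pvSplitNl : List Char → List (List Char)
  | [] => [[]]
  | c :: rest =>
    if c = '\n' then [] :: pvSplitNl rest
    else match pvSplitNl rest with
         | r :: rs => (c :: r) :: rs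
         | [] => [[c]]

lemma pvSplitNl_ne_nil (l : List Char) : pvSplitNl l ≠ [] := by
  cases l with
  | nil => simp [pvSplitNl]
  | cons c rest =>
    simp only [pvSplitNl]
    split
    · simp
    · cases h : pvSplitNl rest <;> simp

lemma splitOn_go_eq (fuel : Nat) (l cur : List Char) (acc : List (List Char)) (h : l.length < fuel) :
    PySem.Chars.splitOn.go ['\n'] fuel l cur acc =
      acc.reverse ++ (match pvSplitNl l with
        | r :: rs => (cur.reverse ++ r) :: rs
        | [] => []) := by
  induction fuel generalizing l cur acc with
  | zero => omega
  | succ fuel ih =>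
    cases l with
    | nil => simp [PySem.Chars.splitOn.go, pvSplitNl]
    | cons c rest =>
      by_cases hc : c = '\n'
      · subst hc
        have hpre : List.isPrefixOf ['\n'] ('\n' :: rest) = true := by
          simp [List.isPrefixOf]
        simp only [PySem.Chars.splitOn.go, hpre, if_true, List.length_cons, List.length_nil,
          List.drop_succ_cons, List.drop_zero] at *
        rw [ih rest [] (cur.reverse :: acc) (by omega)]
        simp only [pvSplitNl, if_true]
        cases hs : pvSplitNl rest with
        | nil => exact absurd hs (pvSplitNl_ne_nil rest)
        | cons r rs => simp
      · have hpre : List.isPrefixOf ['\n'] (c :: rest) = false := by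
          simp [List.isPrefixOf]; exact fun hh => absurd hh.symm hc
        simp only [PySem.Chars.splitOn.go, hpre]
        rw [ih rest (c :: cur) acc (by simp at h ⊢; omega)]
        simp only [pvSplitNl, hc, if_false]
        cases hs : pvSplitNl rest with
        | nil => exact absurd hs (pvSplitNl_ne_nil rest)
        | cons r rs => simp

lemma splitOn_nl (l : List Char) : PySem.Chars.splitOn l ['\n'] = pvSplitNl l := by
  rw [PySem.Chars.splitOn, splitOn_go_eq _ _ _ _ (by omega)]
  cases hs : pvSplitNl l with
  | nil => exact absurd hs (pvSplitNl_ne_nil l)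
  | cons r rs => simp

-- split₀.go lemmas
lemma split₀_go_acc (s : List Char) : ∀ (cur : List Char) (acc : List (List Char)), PySem.Chars.split₀.go s cur acc = acc.reverse ++ PySem.Chars.split₀.go s cur [] := by
  induction s with
  | nil => intro cur acc; simp only [PySem.Chars.split₀.go]; split_ifs <;> simp
  | cons c rest ih =>
    intro cur acc
    simp only [PySem.Chars.split₀.go]
    split_ifs with h1 h2
    · rw [ih [] acc]
    · rw [ih [] (cur.reverse :: acc), ih [] [cur.reverse]]; simp
    · rw [ih (c :: cur) acc]

lemma split₀_go_space {ws : Char} (hws : PySem.Chars.isspace ws = true) (a : List Char) :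
    ∀ (b cur : List Char) (acc : List (List Char)), PySem.Chars.split₀.go (a ++ ws :: b) cur acc =
      PySem.Chars.split₀.go a cur acc ++ PySem.Chars.split₀ b := by
  induction a with
  | nil =>
    intro b cur acc
    simp only [List.nil_append, PySem.Chars.split₀.go, hws, if_true, PySem.Chars.split₀]
    split_ifs with h <;> rw [split₀_go_acc]
  | cons c rest ih =>
    intro b cur acc
    simp only [List.cons_append, PySem.Chars.split₀.go]
    split_ifs with h1 h2 <;> rw [ih]

lemma split₀_append_space {ws : Char} (hws : PySem.Chars.isspace ws = true) (a b : List Char) :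
    PySem.Chars.split₀ (a ++ ws :: b) = PySem.Chars.split₀ a ++ PySem.Chars.split₀ b := by
  simp only [PySem.Chars.split₀]
  rw [split₀_go_space hws]
  rfl

lemma split₀_intercalate {ws : Char} (hws : PySem.Chars.isspace ws = true) (l : List (List Char)) :
    PySem.Chars.split₀ (List.intercalate [ws] l) = (l.map PySem.Chars.split₀).flatten := by
  induction l with
  | nil => simp [List.intercalate]; rfl
  | cons a t ih =>
    cases t with
    | nil => simp [List.intercalate, List.intersperse]
    | cons b t' =>
      have : List.intercalate [ws] (a :: b :: t') = a ++ ws :: List.intercalate [ws] (b :: t') := by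
        simp [List.intercalate, List.intersperse]
      rw [this, split₀_append_space hws, ih]
      simp

-- split₀ ignores surrounding whitespace
lemma split₀_go_allspace (t : List Char) (ht : ∀ c ∈ t, PySem.Chars.isspace c = true) :
    ∀ (cur : List Char) (acc : List (List Char)), PySem.Chars.split₀.go t cur acc = PySem.Chars.split₀.go [] cur acc := by
  induction t with
  | nil => intro cur acc; rfl
  | cons c rest ih =>
    intro cur acc
    have hc : PySem.Chars.isspace c = true := ht c (by simp)
    have ht' : ∀ c ∈ rest, PySem.Chars.isspace c = true := fun x hx => ht x (by simp [hx])
    simp only [PySem.Chars.split₀.go, hc, if_true]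
    split_ifs with h
    · rw [ih ht']; simp [PySem.Chars.split₀.go]
    · rw [ih ht']; simp [PySem.Chars.split₀.go]

lemma split₀_go_append_congr (s : List Char) {t t' : List Char}
    (h : ∀ (cur : List Char) (acc : List (List Char)), PySem.Chars.split₀.go t cur acc = PySem.Chars.split₀.go t' cur acc) :
    ∀ (cur : List Char) (acc : List (List Char)), PySem.Chars.split₀.go (s ++ t) cur acc = PySem.Chars.split₀.go (s ++ t') cur acc := by
  induction s with
  | nil => exact h
  | cons c rest ih =>
    intro cur acc
    simp only [List.cons_append, PySem.Chars.split₀.go]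
    split_ifs <;> rw [ih]

lemma split₀_append_allspace (s t : List Char) (ht : ∀ c ∈ t, PySem.Chars.isspace c = true) :
    PySem.Chars.split₀ (s ++ t) = PySem.Chars.split₀ s := by
  have := split₀_go_append_congr s (split₀_go_allspace t ht) [] []
  simpa [PySem.Chars.split₀] using this

lemma split₀_lstrip (l : List Char) : PySem.Chars.split₀ (PySem.Chars.lstrip l) = PySem.Chars.split₀ l := by
  induction l with
  | nil => rfl
  | cons c rest ih =>
    by_cases hc : PySem.Chars.isspace c = true
    · have : PySem.Chars.split₀ (c :: rest) = PySem.Chars.split₀ rest := by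
        have := split₀_append_space hc [] rest
        simpa using this
      rw [this, ← ih]
      simp [PySem.Chars.lstrip, List.dropWhile, hc]
    · simp [PySem.Chars.lstrip, List.dropWhile, Bool.of_not_eq_true hc]

lemma split₀_strip (l : List Char) : PySem.Chars.split₀ (PySem.Chars.strip l) = PySem.Chars.split₀ l := by
  have key : ∀ (x : List Char), x = (x.reverse.dropWhile PySem.Chars.isspace).reverse ++ (x.reverse.takeWhile PySem.Chars.isspace).reverse := by
    intro x
    conv_lhs => rw [← x.reverse_reverse, ← List.takeWhile_append_dropWhile (p := PySem.Chars.isspace) (l := x.reverse)]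
    rw [List.reverse_append]
  rw [PySem.Chars.strip, ← split₀_lstrip l]
  conv_rhs => rw [key (PySem.Chars.lstrip l)]
  rw [PySem.Chars.rstrip, split₀_append_allspace]
  intro c hc
  exact List.mem_takeWhile_imp (List.mem_reverse.mp hc)

-- the comment-stripping of one line equals takeWhile (· ≠ '#')
lemma find_go_hash (l : List Char) : ∀ k : Nat, PySem.Chars.find.go ['#'] l k =
    if '#' ∈ l then ((k : Int) + (l.takeWhile (· ≠ '#')).length) else -1 := by
  induction l with
  | nil => intro k; simp [PySem.Chars.find.go]
  | cons c rest ih =>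
    intro k
    by_cases hc : c = '#'
    · subst hc
      have hpre : List.isPrefixOf ['#'] ('#' :: rest) = true := by simp [List.isPrefixOf]
      simp [PySem.Chars.find.go, hpre, List.takeWhile]
    · have hpre : List.isPrefixOf ['#'] (c :: rest) = false := by
        simp [List.isPrefixOf]; exact fun hh => absurd hh.symm hc
      simp only [PySem.Chars.find.go, hpre]
      rw [ih (k + 1)]
      by_cases hm : '#' ∈ rest
      · simp [hm, hc, List.takeWhile, List.mem_cons]
        ring
      · simp [hm, List.mem_cons, Ne.symm hc]

lemma comm_eq (l : List Char) :
    (if PySem.Chars.isIn ['#'] l = true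
     then PySem.Chars.slice l none (some (PySem.Chars.find l ['#']))
     else l) = l.takeWhile (· ≠ '#') := by
  have hfind : PySem.Chars.find l ['#'] = if '#' ∈ l then ((l.takeWhile (· ≠ '#')).length : Int) else -1 := by
    rw [PySem.Chars.find, find_go_hash]
    split_ifs <;> simp
  by_cases hm : '#' ∈ l
  · have hin : PySem.Chars.isIn ['#'] l = true := by
      rw [PySem.Chars.isIn, hfind]
      simp [hm]
    rw [if_pos hin, hfind, if_pos hm]
    rw [PySem.Chars.slice_eq_listSlice, PySem.List.slice_to _ (by positivity)]
    have hp : l.takeWhile (· ≠ '#') <+: l := List.takeWhile_prefix _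
    simp only [Int.toNat_natCast]
    exact (List.prefix_iff_eq_take.mp hp).symm
  · have hin : PySem.Chars.isIn ['#'] l = false := by
      rw [PySem.Chars.isIn, hfind, if_neg hm]
      simp
    rw [if_neg (by simp [hin])]
    exact (List.takeWhile_eq_self_iff.mpr (by intro x hx; simp; exact fun he => hm (he ▸ hx))).symm

lemma intercalate_cons_head (sep : List Char) (c : Char) (x : List Char) (xs : List (List Char)) :
    List.intercalate sep ((c :: x) :: xs) = c :: List.intercalate sep (x :: xs) := by
  cases xs <;> simp [List.intercalate, List.intersperse]

-- scrub characterisation: comment-free text joined by newlines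
lemma pvScrub_eq (cs : List Char) :
    pvScrub cs false = List.intercalate ['\n'] ((pvSplitNl cs).map (fun l => l.takeWhile (· ≠ '#'))) ∧
    pvScrub cs true = (if (pvSplitNl cs).tail = [] then []
      else '\n' :: List.intercalate ['\n'] (((pvSplitNl cs).tail).map (fun l => l.takeWhile (· ≠ '#')))) := by
  induction cs with
  | nil => simp [pvScrub, pvSplitNl, List.intercalate]
  | cons c rest ih =>
    obtain ⟨ih1, ih2⟩ := ih
    by_cases hnl : c = '\n'
    · subst hnl
      constructor
      · simp only [pvScrub, pvSplitNl, if_true, List.map_cons]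
        cases hs : pvSplitNl rest with
        | nil => exact absurd hs (pvSplitNl_ne_nil rest)
        | cons r rs =>
          rw [ih1, hs]
          simp [List.intercalate]
      · simp only [pvScrub, pvSplitNl, if_true, List.tail_cons]
        rw [ih1]
        simp [pvSplitNl_ne_nil rest]
    · by_cases hh : c = '#'
      · subst hh
        have h1 : ('#' : Char) = '\n' ↔ False := by simp
        constructor
        · simp only [pvScrub, pvSplitNl, h1, reduceIte]
          rw [ih2]
          cases hs : pvSplitNl rest with
          | nil => exact absurd hs (pvSplitNl_ne_nil rest)
          | cons r rs =>
            simp only [List.map_cons, List.tail_cons, List.takeWhile]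
            simp
            cases rs with
            | nil => simp [List.intercalate]
            | cons b t => simp [List.intercalate]
        · simp only [pvScrub, pvSplitNl, h1, reduceIte]
          rw [ih2]
          cases hs : pvSplitNl rest with
          | nil => exact absurd hs (pvSplitNl_ne_nil rest)
          | cons r rs => simp
      · constructor
        · simp only [pvScrub, pvSplitNl, hnl, hh, reduceIte]
          cases hs : pvSplitNl rest with
          | nil => exact absurd hs (pvSplitNl_ne_nil rest)
          | cons r rs =>
            rw [ih1, hs]
            simp only [List.map_cons, List.takeWhile]
            simp [hh, intercalate_cons_head]
        · simp only [pvScrub, pvSplitNl, hnl, hh, reduceIte]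
          rw [ih2]
          cases hs : pvSplitNl rest with
          | nil => exact absurd hs (pvSplitNl_ne_nil rest)
          | cons r rs => simp

-- A's per-line transformation, named for the proofs
def pvG (line : String) : String :=
  PySem.Str.strip (if PySem.Str.isIn "#" line = true
                   then PySem.Str.slice line none (some (PySem.Str.find line "#"))
                   else line)

lemma pvG_ofList (l : List Char) :
    pvG (String.ofList l) = String.ofList (PySem.Chars.strip (l.takeWhile (· ≠ '#'))) := by
  have hin : PySem.Str.isIn "#" (String.ofList l) = PySem.Chars.isIn ['#'] l := by
    simp [PySem.Str.isIn]
  rw [pvG, ← comm_eq l, hin]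
  split_ifs with h
  · simp [PySem.Str.strip, PySem.Str.slice, PySem.Str.find]
  · simp [PySem.Str.strip]

-- the A-side fold builds a filtered map
lemma foldl_lines (l : List String) (acc : List String) :
    l.foldl (fun acc line => if pvG line ≠ "" then acc ++ [pvG line] else acc) acc =
      acc ++ (l.map pvG).filter (fun s => decide (s ≠ "")) := by
  induction l generalizing acc with
  | nil => simp
  | cons x t ih =>
    simp only [List.foldl_cons, List.map_cons, List.filter_cons]
    split_ifs <;> rw [ih] <;> simp_all

-- dropping the pieces a predicate rejects does not change the flattened result when they map to []
lemma flatten_filter {α β : Type} (f : α → List β) (q : α → Bool) (L : List α)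
    (h : ∀ l ∈ L, q l = false → f l = []) :
    ((L.filter q).map f).flatten = (L.map f).flatten := by
  induction L with
  | nil => rfl
  | cons x t ih =>
    have ih' := ih (fun l hl => h l (by simp [hl]))
    by_cases hx : q x = true
    · simp [hx, ih']
    · simp only [List.filter_cons, Bool.not_eq_true] at hx ⊢
      rw [hx]
      simp [h x (by simp) hx, ih']

-- the central token equality
lemma tokens_eq (content : String) :
    PySem.Chars.split₀ ((PySem.Str.join " "
        ((((pvSplitNl content.toList).map String.ofList).map pvG).filter (fun s => decide (s ≠ "")))).toList) =
      PySem.Chars.split₀ (pvScrub content.toList false) := by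
  rw [List.map_map]
  have hmapg : ((pvSplitNl content.toList).map (pvG ∘ String.ofList)) =
      (pvSplitNl content.toList).map (fun l => String.ofList (PySem.Chars.strip (l.takeWhile (· ≠ '#')))) :=
    List.map_congr_left (fun l _ => pvG_ofList l)
  rw [hmapg, List.filter_map]
  have hjoin : ∀ (M : List (List Char)), (PySem.Str.join " " (M.map String.ofList)).toList =
      List.intercalate [' '] M := by
    intro M
    simp [PySem.Str.join, PySem.Chars.join, List.map_map, Function.comp_def]
  have hm : ∀ (M : List (List Char)),
      List.map (fun l => String.ofList (PySem.Chars.strip (l.takeWhile (· ≠ '#')))) M =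
        List.map String.ofList (M.map (fun l => PySem.Chars.strip (l.takeWhile (· ≠ '#')))) := by
    intro M; rw [List.map_map]; rfl
  rw [hm, hjoin, split₀_intercalate (by decide), List.map_map]
  have hpq : List.filter ((fun s => decide (s ≠ "")) ∘ fun l =>
        String.ofList (PySem.Chars.strip (l.takeWhile (· ≠ '#')))) (pvSplitNl content.toList) =
      List.filter (fun l => decide (PySem.Chars.strip (l.takeWhile (· ≠ '#')) ≠ []))
        (pvSplitNl content.toList) :=
    List.filter_congr (by intro l _; simp)
  rw [hpq]
  have hstrip : List.map (PySem.Chars.split₀ ∘ fun l => PySem.Chars.strip (l.takeWhile (· ≠ '#')))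
        (List.filter (fun l => decide (PySem.Chars.strip (l.takeWhile (· ≠ '#')) ≠ [])) (pvSplitNl content.toList)) =
      List.map (fun l => PySem.Chars.split₀ (l.takeWhile (· ≠ '#')))
        (List.filter (fun l => decide (PySem.Chars.strip (l.takeWhile (· ≠ '#')) ≠ [])) (pvSplitNl content.toList)) :=
    List.map_congr_left (fun l _ => split₀_strip _)
  rw [hstrip, flatten_filter _ _ _ (by
    intro l _ hq
    simp only [decide_eq_false_iff_not, not_not] at hq
    rw [← split₀_strip (l.takeWhile (· ≠ '#')), hq]
    rfl)]
  have h2 : ((pvSplitNl content.toList).map (fun l => PySem.Chars.split₀ (l.takeWhile (· ≠ '#')))).flatten =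
      PySem.Chars.split₀ (List.intercalate ['\n'] ((pvSplitNl content.toList).map (fun l => l.takeWhile (· ≠ '#')))) := by
    rw [split₀_intercalate (by decide), List.map_map]
    rfl
  rw [h2, ← (pvScrub_eq content.toList).1]

-- ===== VERDICT (by name: the statement is the Claim_ definition above) =====
theorem normalize_block_content_py_spec : Claim_equal_normalize_block_content_py := by
  intro content _
  unfold Spec_normalize_block_content_py
  have hsplit : (PySem.Str.split? content "\n").getD [] = (pvSplitNl content.toList).map String.ofList := by
    simp [PySem.Str.split?, PySem.Chars.split?, splitOn_nl]
  simp only [normalize_block_content_py, normalize_block_content_py_alt, hsplit]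
  have hb : (fun (acc : List String) (line : String) =>
      if PySem.Str.strip (if PySem.Str.isIn "#" line = true
              then PySem.Str.slice line none (some (PySem.Str.find line "#"))
              else line) ≠ ""
      then acc ++ [PySem.Str.strip (if PySem.Str.isIn "#" line = true
              then PySem.Str.slice line none (some (PySem.Str.find line "#"))
              else line)]
      else acc) =
      (fun acc line => if pvG line ≠ "" then acc ++ [pvG line] else acc) := rfl
  rw [hb, foldl_lines, List.nil_append]
  have ht := tokens_eq content
  simp only [PySem.Str.split₀, String.toList_ofList]
  rw [ht]
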